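-- pv_equiv track=rewrite | github.com/BogyunJeong/SSAFY_with_me | bk_Jung/5week/babygin.py | check
-- ===== SOURCE A (Python) =====
-- def check(player):
--     for i in range(len(player)-2):
--         if player[i] and player[i+1] and player[i+2]:
--             return True
--
--     for i in player:
--         if i >= 3:
--             return True
--
--
--     return False
-- ===== SOURCE B (Python) =====
-- def check(player):
--     streak = 0
--     for x in player:
--         streak = 0 if not x else streak + 1
--         if streak >= 3 or x >= 3:
--             return True
--     return False
-- ===== Notes on version B (the rewrite author's own statement) =====
-- stated objective: simpler
-- what changed: Replaced the indexed triple-window scan plus a separate >=3 scan with one single pass maintaining a streak counter of consecutive nonzero counts, checking both the run and the triple condition on the fly.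
import Mathlib
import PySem

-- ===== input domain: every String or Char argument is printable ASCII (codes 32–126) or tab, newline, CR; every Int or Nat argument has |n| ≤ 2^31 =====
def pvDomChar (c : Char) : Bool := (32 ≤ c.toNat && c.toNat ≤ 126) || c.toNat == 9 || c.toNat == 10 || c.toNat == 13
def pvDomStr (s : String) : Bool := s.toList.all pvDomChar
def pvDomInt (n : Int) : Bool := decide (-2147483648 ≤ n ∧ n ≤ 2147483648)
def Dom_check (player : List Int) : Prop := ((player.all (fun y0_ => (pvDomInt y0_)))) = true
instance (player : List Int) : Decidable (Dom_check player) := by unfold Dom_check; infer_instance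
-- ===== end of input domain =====

-- B is a single streak-counter pass replacing A's indexed triple-window scan plus separate >=3 scan; objective: simpler.

-- ===== PORT A =====
-- for i in range(len(player)-2): if player[i] and player[i+1] and player[i+2]: return True
-- for i in player: if i >= 3: return True
-- return False
def check (player : List Int) : Bool :=
  if (PySem.List.pyRange 0 ((player.length : Int) - 2) 1).any (fun i =>
      (PySem.List.pyGetD player i 0 != 0) &&
      (PySem.List.pyGetD player (i+1) 0 != 0) &&
      (PySem.List.pyGetD player (i+2) 0 != 0))
  then true
  else player.any (fun i => decide (3 ≤ i))

-- ===== PORT B =====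
-- the loop body of Source B's check, with early return as recursion
def checkAltGo (streak : Int) : List Int → Bool
  | [] => false
  | x :: rest =>
    let streak' : Int := if x = 0 then 0 else streak + 1
    if 3 ≤ streak' ∨ 3 ≤ x then true else checkAltGo streak' rest

def check_alt (player : List Int) : Bool := checkAltGo 0 player

-- ===== PRECONDITION & SPEC =====
def Spec_check (player : List Int) (out : Bool) : Prop := out = check_alt player
instance (player : List Int) (out : Bool) : Decidable (Spec_check player out) := by unfold Spec_check; infer_instance

-- ===== CLAIM (what is proved, stated in full; the proofs are below) =====
def Claim_equal_check : Prop := ∀ (player : List Int), Dom_check player → Spec_check player (check player)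

-- ===== LEMMAS AND PROOFS =====

-- reference: a run of three consecutive nonzero elements exists
def win : List Int → Bool
  | a :: b :: c :: r => ((a != 0) && (b != 0) && (c != 0)) || win (b :: c :: r)
  | _ => false

def trip (l : List Int) : Bool := l.any (fun x => decide (3 ≤ x))

-- head prefixes for the streak invariant
def pre1 : List Int → Bool
  | x :: _ => x != 0
  | [] => false

def pre2 : List Int → Bool
  | a :: b :: _ => (a != 0) && (b != 0)
  | _ => false

-- run detector part of checkAltGo (no triple condition)
def auxA (s : Int) : List Int → Bool
  | [] => false
  | x :: r => if x ≠ 0 ∧ 3 ≤ s + 1 then true else auxA (if x = 0 then 0 else s + 1) r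

theorem win_cons_zero (r : List Int) : win (0 :: r) = win r := by
  match r with
  | [] => rfl
  | [_] => rfl
  | b :: c :: r' => simp [win]

theorem pre2_cons_zero (r : List Int) : pre2 (0 :: r) = false := by
  match r with
  | [] => rfl
  | b :: r' => simp [pre2]

theorem win_cons_nonzero (x : Int) (hx : x ≠ 0) (r : List Int) :
    win (x :: r) = (pre2 r || win r) := by
  match r with
  | [] => simp [win, pre2]
  | [_] => simp [win, pre2]
  | b :: c :: r' =>
    have hx' : (x != 0) = true := by simp [hx]
    simp [win, pre2, hx', Bool.or_comm]

theorem pre2_cons_nonzero (x : Int) (hx : x ≠ 0) (r : List Int) :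
    pre2 (x :: r) = pre1 r := by
  match r with
  | [] => simp [pre2, pre1]
  | b :: r' =>
    have hx' : (x != 0) = true := by simp [hx]
    simp [pre2, pre1, hx']

theorem auxA_char (l : List Int) :
    auxA 0 l = win l ∧ auxA 1 l = (win l || pre2 l) ∧
      ∀ s : Int, 2 ≤ s → auxA s l = (win l || pre2 l || pre1 l) := by
  induction l with
  | nil => exact ⟨rfl, by simp [auxA, win, pre2], fun s _ => by simp [auxA, win, pre2, pre1]⟩
  | cons x r ih =>
    obtain ⟨ih0, ih1, ih2⟩ := ih
    by_cases hx : x = 0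
    · subst hx
      have hstep : ∀ s : Int, auxA s (0 :: r) = auxA 0 r := by
        intro s; simp [auxA]
      refine ⟨?_, ?_, fun s hs => ?_⟩
      · rw [hstep, ih0, win_cons_zero]
      · rw [hstep, ih0, win_cons_zero, pre2_cons_zero]; simp
      · rw [hstep, ih0, win_cons_zero, pre2_cons_zero]; simp [pre1]
    · refine ⟨?_, ?_, fun s hs => ?_⟩
      · have h : auxA 0 (x :: r) = auxA 1 r := by
          simp only [auxA, if_neg hx]
          rw [if_neg (by omega : ¬ (x ≠ 0 ∧ (3:Int) ≤ 0 + 1))]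
          norm_num
        rw [h, ih1, win_cons_nonzero x hx, Bool.or_comm]
      · have h : auxA 1 (x :: r) = auxA 2 r := by
          simp only [auxA, if_neg hx]
          rw [if_neg (by omega : ¬ (x ≠ 0 ∧ (3:Int) ≤ 1 + 1))]
          norm_num
        rw [h, ih2 2 (by norm_num), win_cons_nonzero x hx, pre2_cons_nonzero x hx]
        cases win r <;> cases pre2 r <;> cases pre1 r <;> rfl
      · have h : auxA s (x :: r) = true := by
          simp only [auxA]
          rw [if_pos ⟨hx, by omega⟩]
        rw [h, pre2_cons_nonzero x hx, win_cons_nonzero x hx]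
        simp [pre1, hx]

theorem checkAltGo_eq (l : List Int) : ∀ s : Int, checkAltGo s l = (auxA s l || trip l) := by
  induction l with
  | nil => intro s; rfl
  | cons x r ih =>
    intro s
    simp only [checkAltGo, auxA, trip, List.any_cons]
    by_cases hx : x = 0
    · subst hx
      rw [if_pos (rfl : (0:Int) = 0)]
      rw [if_neg (by omega : ¬ ((3:Int) ≤ 0 ∨ (3:Int) ≤ 0))]
      rw [if_neg (by simp : ¬ ((0:Int) ≠ 0 ∧ (3:Int) ≤ s + 1))]
      rw [ih 0]
      simp [trip]
    · rw [if_neg hx]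
      by_cases hs : (3:Int) ≤ s + 1
      · rw [if_pos (Or.inl hs), if_pos ⟨hx, hs⟩]; simp
      · rw [if_neg (fun h2 => hs h2.2 : ¬ (x ≠ 0 ∧ (3:Int) ≤ s + 1))]
        by_cases h3 : (3:Int) ≤ x
        · rw [if_pos (Or.inr h3)]; simp [h3]
        · rw [if_neg (by omega : ¬ ((3:Int) ≤ s + 1 ∨ (3:Int) ≤ x))]
          rw [ih (s+1)]
          simp [trip, h3]

-- A's first loop equals win, Nat-indexed form
theorem natAny_eq_win (l : List Int) :
    ((List.range (l.length - 2)).any (fun k =>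
      (l.getD k 0 != 0) && (l.getD (k+1) 0 != 0) && (l.getD (k+2) 0 != 0))) = win l := by
  induction l with
  | nil => rfl
  | cons a r ih =>
    match r with
    | [] => rfl
    | [_] => rfl
    | b :: c :: r' =>
      have hlen : (a :: b :: c :: r').length - 2 = ((b :: c :: r').length - 2) + 1 := by
        simp
      rw [hlen, List.range_succ_eq_map, List.any_cons, List.any_map]
      have htail : (List.range ((b :: c :: r').length - 2)).any
          ((fun k => ((a :: b :: c :: r').getD k 0 != 0) &&
            ((a :: b :: c :: r').getD (k+1) 0 != 0) &&
            ((a :: b :: c :: r').getD (k+2) 0 != 0)) ∘ Nat.succ)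
          = win (b :: c :: r') := by
        rw [← ih]
        refine congrArg (List.any _) (funext fun k => ?_)
        simp [Function.comp]
      rw [htail]
      simp [win, List.getD]

-- A's first loop equals win
theorem rangeAny_eq_win (l : List Int) :
    ((PySem.List.pyRange 0 ((l.length : Int) - 2) 1).any (fun i =>
      (PySem.List.pyGetD l i 0 != 0) &&
      (PySem.List.pyGetD l (i+1) 0 != 0) &&
      (PySem.List.pyGetD l (i+2) 0 != 0))) = win l := by
  have hn : (((l.length : Int)) - 2 - 0).toNat = l.length - 2 := by omega
  rw [PySem.List.pyRange_one, hn, List.any_map, ← natAny_eq_win]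
  refine congrArg (List.any _) (funext fun k => ?_)
  simp only [Function.comp, zero_add]
  have h1 : ((k:Int)) + 1 = (((k+1:Nat)):Int) := by push_cast; ring
  have h2 : ((k:Int)) + 2 = (((k+2:Nat)):Int) := by push_cast; ring
  rw [h1, h2, PySem.List.pyGetD_natCast, PySem.List.pyGetD_natCast,
    PySem.List.pyGetD_natCast]

-- A equals win || trip
theorem check_eq (l : List Int) : check l = (win l || trip l) := by
  unfold check
  rw [rangeAny_eq_win]
  cases h : win l with
  | false => simp [trip]
  | true => simp

-- ===== VERDICT (by name: the statement is the Claim_ definition above) =====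
theorem check_spec : Claim_equal_check := by
  intro player _
  unfold Spec_check check_alt
  rw [check_eq, checkAltGo_eq, (auxA_char player).1]
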